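-- pv_equiv track=rewrite | github.com/sharadbachani-oss/hexagene | src/scoring.py | binary_to_pattern
-- ===== SOURCE A (Python) =====
-- def binary_to_pattern(binary: int) -> str:
--     """
--     Convert binary integer to R/Y pattern.
--
--     Parameters
--     ----------
--     binary : int
--         Integer encoding (0-63)
--
--     Returns
--     -------
--     str
--         6-character R/Y pattern
--     """
--     pattern = ''
--     for i in range(6):
--         if binary & (1 << (5 - i)):
--             pattern += 'R'
--         else:
--             pattern += 'Y'
--     return pattern
-- ===== SOURCE B (Python) =====
-- def binary_to_pattern(binary: int) -> str:
--     """Convert binary integer to R/Y pattern (6 chars, MSB first)."""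
--     s = format(binary & 0x3F, '06b')
--     return s.translate(str.maketrans('01', 'YR'))
-- ===== Notes on version B (the rewrite author's own statement) =====
-- stated objective: idiomatic
-- what changed: Replaces the explicit per-bit masking loop with a single mask (& 0x3F), integer-to-binary-string formatting via format(..., '06b'), and a str.translate character remap.
import Mathlib
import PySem

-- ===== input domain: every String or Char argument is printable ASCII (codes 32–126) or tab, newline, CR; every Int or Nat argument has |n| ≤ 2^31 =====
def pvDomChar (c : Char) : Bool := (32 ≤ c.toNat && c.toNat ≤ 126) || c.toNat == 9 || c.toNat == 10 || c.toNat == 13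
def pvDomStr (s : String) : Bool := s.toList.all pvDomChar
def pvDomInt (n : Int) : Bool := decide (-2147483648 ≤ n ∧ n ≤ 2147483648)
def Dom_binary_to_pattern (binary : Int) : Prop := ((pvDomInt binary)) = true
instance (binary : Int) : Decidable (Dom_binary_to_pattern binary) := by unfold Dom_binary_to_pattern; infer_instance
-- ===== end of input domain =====

-- B replaces A's per-bit masking loop with mask-once + binary formatting + character remap (idiomatic, same cost).

-- ===== PORT A =====
-- 'pattern += "R"/"Y"' is ported on the char-list side (String.ofList at return); exact for these ASCII chars
def binary_to_pattern (binary : Int) : String :=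
  String.ofList ((List.range 6).foldl (fun (pattern : List Char) (i : Nat) =>
    if PySem.Int.band binary ((1 : Int) <<< ((5 - i : Nat))) ≠ 0 then pattern ++ ['R'] else pattern ++ ['Y']) [])

-- ===== PORT B =====
-- s = format(binary & 0x3F, '06b'): binary digits of the masked value (which is ≥ 0, so .toNat is exact),
-- zero-padded to width 6; then s.translate(str.maketrans('01', 'YR'))
def binary_to_pattern_alt (binary : Int) : String :=
  let m : Nat := (PySem.Int.band binary 63).toNat
  let digits : List Char := Nat.toDigits 2 m
  let s : List Char := List.replicate (6 - digits.length) '0' ++ digits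
  String.ofList (s.map (fun c => if c = '1' then 'R' else if c = '0' then 'Y' else c))

-- ===== PRECONDITION & SPEC =====
def Spec_binary_to_pattern (binary : Int) (out : String) : Prop := out = binary_to_pattern_alt binary
instance (binary : Int) (out : String) : Decidable (Spec_binary_to_pattern binary out) := by unfold Spec_binary_to_pattern; infer_instance

-- ===== CLAIM (what is proved, stated in full; the proofs are below) =====
def Claim_equal_binary_to_pattern : Prop := ∀ (binary : Int), Dom_binary_to_pattern binary → Spec_binary_to_pattern binary (binary_to_pattern binary)

-- ===== LEMMAS AND PROOFS =====

-- Python & (band) against a mask b whose bits lie inside 63 only depends on the low 6 bits (= band · 63)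
theorem band_low (a : Int) (b : Nat) (hb : b &&& 63 = b) :
    PySem.Int.band a ((b : Nat) : Int) = (((PySem.Int.band a 63).toNat &&& b : Nat) : Int) := by
  have hbt : ∀ i, b.testBit i = (b.testBit i && (63 : Nat).testBit i) := by
    intro i; conv_lhs => rw [← hb, Nat.testBit_and]
  by_cases ha : 0 ≤ a
  · rw [PySem.Int.band_of_nonneg ha (by positivity), PySem.Int.band_of_nonneg ha (by norm_num)]
    simp only [Int.toNat_natCast]
    norm_cast
    apply Nat.eq_of_testBit_eq; intro i
    simp only [Nat.testBit_and]
    rw [hbt i]; cases a.toNat.testBit i <;> cases b.testBit i <;> cases (63:Nat).testBit i <;> simp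
  · have hb' : (0:Int) ≤ ((b:Nat):Int) := by positivity
    simp only [PySem.Int.band, if_neg ha, if_pos hb', if_pos (by norm_num : (0:Int) ≤ 63)]
    set m := (-a - 1).toNat with hm
    have h1 : ((b:Int)).toNat = b := by simp
    have h2 : ((63:Int)).toNat = 63 := by decide
    rw [h1, h2]
    simp only [Int.toNat_natCast]
    norm_cast
    have hbm : b &&& m = b &&& (63 &&& m) := by
      calc b &&& m = (b &&& 63) &&& m := by rw [hb]
        _ = b &&& (63 &&& m) := Nat.and_assoc ..
    rw [hbm]
    have hml : 63 &&& m < 64 := Nat.lt_succ_of_le Nat.and_le_left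
    have hbl : b < 64 := by
      have : b &&& 63 ≤ 63 := Nat.and_le_right
      omega
    exact (by decide : ∀ b' < 64, ∀ c < 64, b' - (b' &&& c) = (63 - c) &&& b') b hbl (63 &&& m) hml

theorem band63_lt (a : Int) : (PySem.Int.band a 63).toNat < 64 := by
  by_cases ha : 0 ≤ a
  · rw [PySem.Int.band_of_nonneg ha (by norm_num)]
    simp only [Int.toNat_natCast]
    exact Nat.lt_succ_of_le Nat.and_le_right
  · simp only [PySem.Int.band, if_neg ha, if_pos (by norm_num : (0:Int) ≤ 63)]
    simp only [Int.toNat_natCast]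
    have : (63:Int).toNat = 63 := by decide
    rw [this]
    omega

theorem binary_to_pattern_eq_alt (binary : Int) :
    binary_to_pattern binary = binary_to_pattern_alt binary := by
  have h32 := band_low binary 32 (by decide)
  have h16 := band_low binary 16 (by decide)
  have h8 := band_low binary 8 (by decide)
  have h4 := band_low binary 4 (by decide)
  have h2 := band_low binary 2 (by decide)
  have h1 := band_low binary 1 (by decide)
  push_cast at h32 h16 h8 h4 h2 h1
  simp only [binary_to_pattern, binary_to_pattern_alt, List.range_succ, List.range_zero,
    List.nil_append, List.foldl_append, List.foldl_cons, List.foldl_nil, Nat.reduceSub]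
  have e5 : (1:Int) <<< (5:Nat) = 32 := by decide
  have e4 : (1:Int) <<< (4:Nat) = 16 := by decide
  have e3 : (1:Int) <<< (3:Nat) = 8 := by decide
  have e2 : (1:Int) <<< (2:Nat) = 4 := by decide
  have e1 : (1:Int) <<< (1:Nat) = 2 := by decide
  have e0 : (1:Int) <<< (0:Nat) = 1 := by decide
  rw [e5, e4, e3, e2, e1, e0, h32, h16, h8, h4, h2, h1]
  have hr := band63_lt binary
  generalize (PySem.Int.band binary 63).toNat = r at hr ⊢
  revert hr; revert r
  decide

-- ===== VERDICT (by name: the statement is the Claim_ definition above) =====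
theorem binary_to_pattern_spec : Claim_equal_binary_to_pattern := by
  intro binary _
  exact binary_to_pattern_eq_alt binary
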